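-- pv_equiv track=rewrite | github.com/GeniaHarrietBoeing/Rosalind | HDAG.py | explore
-- ===== SOURCE A (Python) =====
-- def explore(A, visited, i, counter, post):
--     visited[i] = True
--     for j in range(1, len(A)):
--         if A[i][j] == 1 and not visited[j]:
--             visited, counter, post = explore(A, visited, j, counter, post)
--     counter += 1
--     post[i] = counter
--     return visited, counter, post
-- ===== SOURCE B (Python) =====
-- def explore(A, visited, i, counter, post):
--     n = len(A)
--     visited[i] = True
--     stack = [(i, 1)]
--     while stack:
--         node, j = stack[-1]
--         if j < n:
--             stack[-1] = (node, j + 1)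
--             if A[node][j] == 1 and not visited[j]:
--                 visited[j] = True
--                 stack.append((j, 1))
--         else:
--             stack.pop()
--             counter += 1
--             post[node] = counter
--     return visited, counter, post
-- ===== Notes on version B (the rewrite author's own statement) =====
-- stated objective: alternative
-- what changed: The recursive DFS (recursion inside a for-loop over columns) is replaced by an iterative DFS over an explicit stack of (node, next-column) frames that marks on discovery and assigns the post number when a frame's column scan is exhausted and it is popped.
import Mathlib
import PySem

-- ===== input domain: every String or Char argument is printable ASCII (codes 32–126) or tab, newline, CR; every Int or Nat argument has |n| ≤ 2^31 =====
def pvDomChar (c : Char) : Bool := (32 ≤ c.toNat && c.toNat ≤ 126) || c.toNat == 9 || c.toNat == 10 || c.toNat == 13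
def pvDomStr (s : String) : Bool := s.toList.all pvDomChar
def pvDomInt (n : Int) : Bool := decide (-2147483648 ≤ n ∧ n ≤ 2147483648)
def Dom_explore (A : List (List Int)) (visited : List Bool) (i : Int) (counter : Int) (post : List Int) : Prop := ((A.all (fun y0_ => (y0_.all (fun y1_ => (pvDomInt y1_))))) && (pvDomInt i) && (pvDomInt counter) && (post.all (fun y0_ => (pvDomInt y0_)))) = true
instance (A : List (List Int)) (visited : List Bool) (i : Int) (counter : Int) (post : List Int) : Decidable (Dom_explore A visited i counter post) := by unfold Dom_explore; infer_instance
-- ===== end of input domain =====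

-- B re-implements the recursive DFS as an iterative DFS over an explicit stack of (node, next-column)
-- frames (objective: alternative decomposition, same asymptotic cost). Both Pythons mutate `visited`
-- and `post` in place exactly alike; the theorems below are about the returned triple.

-- ===== PORT A =====
-- A is recursive; the Lean port carries a fuel argument only as a totality guard (fuel
-- `visited.length + 1` bounds the recursion depth, which is ≤ #unvisited nodes + 1).
mutual
def exploreGo (fuel : Nat) (A : List (List Int)) (visited : List Bool) (i : Int) (counter : Int) (post : List Int) : List Bool × Int × List Int :=
  match fuel with
  | 0 => (visited, counter, post)
  | Nat.succ f =>
    let r := exploreLoop f A i (PySem.List.pyRange 1 (A.length : Int) 1)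
      (PySem.List.pySetD visited i true, counter, post)
    (r.1, r.2.1 + 1, PySem.List.pySetD r.2.2 i (r.2.1 + 1))
termination_by (fuel, 0)
def exploreLoop (fuel : Nat) (A : List (List Int)) (i : Int) (js : List Int) (st : List Bool × Int × List Int) : List Bool × Int × List Int :=
  match js with
  | [] => st
  | j :: rest =>
    let st' := if PySem.List.pyGetD (PySem.List.pyGetD A i []) j 0 = 1 ∧ PySem.List.pyGetD st.1 j false = false
      then exploreGo fuel A st.1 j st.2.1 st.2.2
      else st
    exploreLoop fuel A i rest st'
termination_by (fuel, js.length + 1)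
end

def explore (A : List (List Int)) (visited : List Bool) (i : Int) (counter : Int) (post : List Int) : List Bool × Int × List Int :=
  exploreGo (visited.length + 1) A visited i counter post

-- ===== PORT B =====
-- B's while-loop over an explicit stack; fuel is again only a totality guard (each loop
-- iteration strictly decreases a weight bounded by (len visited + 1) * (len A + 2)).
def dfsStep (fuel : Nat) (A : List (List Int)) (stack : List (Int × Int)) (v : List Bool) (c : Int) (p : List Int) : List Bool × Int × List Int :=
  match fuel with
  | 0 => (v, c, p)
  | Nat.succ f =>
    match stack with
    | [] => (v, c, p)
    | (node, j) :: rest =>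
      if j < (A.length : Int) then
        if PySem.List.pyGetD (PySem.List.pyGetD A node []) j 0 = 1 ∧ PySem.List.pyGetD v j false = false then
          dfsStep f A ((j, 1) :: (node, j + 1) :: rest) (PySem.List.pySetD v j true) c p
        else
          dfsStep f A ((node, j + 1) :: rest) v c p
      else
        dfsStep f A rest v (c + 1) (PySem.List.pySetD p node (c + 1))

def explore_alt (A : List (List Int)) (visited : List Bool) (i : Int) (counter : Int) (post : List Int) : List Bool × Int × List Int :=
  dfsStep ((visited.length + 1) * (A.length + 2)) A [(i, 1)]
    (PySem.List.pySetD visited i true) counter post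

-- ===== PRECONDITION & SPEC =====
-- the index window Python A's accesses stay inside: column scans need i ∈ [-n, n) once n ≥ 2;
-- for n ≤ 1 the scan loop is empty and i only has to be a valid index of visited and post
def pvBound (A : List (List Int)) (visited : List Bool) (post : List Int) : Int :=
  if A.length ≤ 1 then min visited.length post.length else A.length

-- Pre_ excludes exactly the inputs where Python A raises IndexError (i outside the window above,
-- visited/post shorter than the matrix, a too-short row), except that it asks EVERY row to have
-- length ≥ len(A) while A happens to return on ragged short rows at nodes its search never visits —
-- row-reachability is not a closed-form shape condition (B returns the same value there).
def Pre_explore (A : List (List Int)) (visited : List Bool) (i : Int) (counter : Int) (post : List Int) : Prop :=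
  (∀ row ∈ A, A.length ≤ row.length) ∧ A.length ≤ visited.length ∧ A.length ≤ post.length ∧
  -(pvBound A visited post) ≤ i ∧ i < pvBound A visited post

instance (A : List (List Int)) (visited : List Bool) (i : Int) (counter : Int) (post : List Int) : Decidable (Pre_explore A visited i counter post) := by unfold Pre_explore; infer_instance

def pvWitness_explore : List (List Int) × List Bool × Int × Int × List Int :=
  ([[0, 1], [1, 0]], [false, false], 0, 0, [0, 0])

def Spec_explore (A : List (List Int)) (visited : List Bool) (i : Int) (counter : Int) (post : List Int) (out : List Bool × Int × List Int) : Prop := out = explore_alt A visited i counter post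
instance (A : List (List Int)) (visited : List Bool) (i : Int) (counter : Int) (post : List Int) (out : List Bool × Int × List Int) : Decidable (Spec_explore A visited i counter post out) := by unfold Spec_explore; infer_instance

-- ===== CLAIM (what is proved, stated in full; the proofs are below) =====
def Claim_equal_explore : Prop := ∀ (A : List (List Int)) (visited : List Bool) (i : Int) (counter : Int) (post : List Int), Dom_explore A visited i counter post → Pre_explore A visited i counter post → Spec_explore A visited i counter post (explore A visited i counter post)

-- ===== LEMMAS AND PROOFS =====

-- number of still-unvisited entries; the fuel arguments are measured against it
def fc (v : List Bool) : Nat := v.count false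

lemma fc_le_length (v : List Bool) : fc v ≤ v.length := List.count_le_length

lemma fc_setD_le (v : List Bool) (i : Int) : fc (PySem.List.pySetD v i true) ≤ fc v := by
  unfold PySem.List.pySetD PySem.List.pySet?
  cases h : PySem.List.pyIdx? v.length i with
  | none => simp [fc]
  | some k =>
    simp only [Option.map_some, Option.getD_some, fc]
    by_cases hk : k < v.length
    · rw [List.count_set hk]; split <;> simp
    · rw [List.set_eq_of_length_le (by omega)]

lemma fc_set_false (v : List Bool) (k : Nat) (hk : k < v.length) (hv : v[k] = false) :
    fc (v.set k true) + 1 = fc v := by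
  unfold fc
  rw [List.count_set hk, hv]
  have h1 : 1 ≤ v.count false := by
    have : (false : Bool) ∈ v := hv ▸ List.getElem_mem hk
    exact List.count_pos_iff.mpr this
  simp
  omega

-- visited is only ever turned true: length preserved, unvisited count non-increasing
lemma loopM_of (fuel : Nat)
    (hgo : ∀ (A : List (List Int)) (v : List Bool) (i c : Int) (p : List Int),
      (exploreGo fuel A v i c p).1.length = v.length ∧ fc (exploreGo fuel A v i c p).1 ≤ fc v) :
    ∀ (A : List (List Int)) (i : Int) (js : List Int) (st : List Bool × Int × List Int),
      (exploreLoop fuel A i js st).1.length = st.1.length ∧ fc (exploreLoop fuel A i js st).1 ≤ fc st.1 := by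
  intro A i js
  induction js with
  | nil => intro st; simp [exploreLoop]
  | cons j rest ih =>
    intro st
    rw [exploreLoop]
    split
    · obtain ⟨h1, h2⟩ := hgo A st.1 j st.2.1 st.2.2
      obtain ⟨h3, h4⟩ := ih (exploreGo fuel A st.1 j st.2.1 st.2.2)
      exact ⟨by omega, by omega⟩
    · exact ih st

lemma goM (fuel : Nat) :
    ∀ (A : List (List Int)) (v : List Bool) (i c : Int) (p : List Int),
      (exploreGo fuel A v i c p).1.length = v.length ∧ fc (exploreGo fuel A v i c p).1 ≤ fc v := by
  induction fuel with
  | zero => intro A v i c p; simp [exploreGo]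
  | succ f ih =>
    intro A v i c p
    rw [exploreGo]
    obtain ⟨h1, h2⟩ := loopM_of f ih A i (PySem.List.pyRange 1 (A.length : Int) 1)
      (PySem.List.pySetD v i true, c, p)
    refine ⟨?_, ?_⟩
    · simpa [PySem.List.length_pySetD] using h1
    · exact le_trans h2 (fc_setD_le v i)

lemma loopM (fuel : Nat) (A : List (List Int)) (i : Int) (js : List Int) (st : List Bool × Int × List Int) :
    (exploreLoop fuel A i js st).1.length = st.1.length ∧ fc (exploreLoop fuel A i js st).1 ≤ fc st.1 :=
  loopM_of fuel (goM fuel) A i js st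

-- fuel stability: any fuel above the unvisited count computes the same loop result
lemma sLoop (f₁ f₂ : Nat) (A : List (List Int)) (i : Int)
    (hexp : ∀ (v : List Bool) (j c : Int) (p : List Int),
      fc (PySem.List.pySetD v j true) < f₁ → fc (PySem.List.pySetD v j true) < f₂ →
      A.length ≤ v.length → exploreGo f₁ A v j c p = exploreGo f₂ A v j c p) :
    ∀ (js : List Int) (st : List Bool × Int × List Int),
      (∀ j ∈ js, 0 ≤ j ∧ j < (A.length : Int)) →
      fc st.1 ≤ f₁ → fc st.1 ≤ f₂ → A.length ≤ st.1.length →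
      exploreLoop f₁ A i js st = exploreLoop f₂ A i js st := by
  intro js
  induction js with
  | nil => intro st _ _ _ _; simp [exploreLoop]
  | cons j rest ih =>
    intro st hjs h1 h2 hL
    rw [exploreLoop, exploreLoop]
    split
    · rename_i hg
      obtain ⟨hj0, hjn⟩ := hjs j (by simp)
      have hjl : j.toNat < st.1.length := by omega
      have hfalse : st.1[j.toNat] = false := by
        rw [PySem.List.pyGetD_eq_getElem st.1 false hj0 (by omega)] at hg
        exact hg.2
      have hset : fc (PySem.List.pySetD st.1 j true) + 1 = fc st.1 := by
        rw [PySem.List.pySetD_of_nonneg st.1 true hj0]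
        exact fc_set_false st.1 j.toNat hjl hfalse
      have heq := hexp st.1 j st.2.1 st.2.2 (by omega) (by omega) hL
      rw [heq]
      obtain ⟨hM1, hM2⟩ := goM f₂ A st.1 j st.2.1 st.2.2
      exact ih _ (fun x hx => hjs x (by simp [hx])) (by omega) (by omega) (by omega)
    · exact ih st (fun x hx => hjs x (by simp [hx])) h1 h2 hL

lemma sExp (f₁ : Nat) :
    ∀ (f₂ : Nat) (A : List (List Int)) (v : List Bool) (i c : Int) (p : List Int),
      fc (PySem.List.pySetD v i true) < f₁ → fc (PySem.List.pySetD v i true) < f₂ →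
      A.length ≤ v.length → exploreGo f₁ A v i c p = exploreGo f₂ A v i c p := by
  induction f₁ with
  | zero => intro f₂ A v i c p h1; omega
  | succ g ih =>
    intro f₂ A v i c p h1 h2 hL
    cases f₂ with
    | zero => omega
    | succ g₂ =>
      rw [exploreGo, exploreGo]
      have hloop := sLoop g g₂ A i
        (fun v' j c' p' ha hb hc => ih g₂ A v' j c' p' ha hb hc)
        (PySem.List.pyRange 1 (A.length : Int) 1)
        (PySem.List.pySetD v i true, c, p)
        (fun x hx => by
          have := (PySem.List.mem_pyRange_one).mp hx
          exact ⟨by omega, this.2⟩)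
        (by change fc (PySem.List.pySetD v i true) ≤ g; omega)
        (by change fc (PySem.List.pySetD v i true) ≤ g₂; omega)
        (by change A.length ≤ (PySem.List.pySetD v i true).length
            rw [PySem.List.length_pySetD]; exact hL)
      rw [hloop]

-- B's stack machine, interpreted frame by frame through A's loop
def foldStack (A : List (List Int)) (stack : List (Int × Int)) (st : List Bool × Int × List Int) : List Bool × Int × List Int :=
  match stack with
  | [] => st
  | (node, j) :: rest =>
    let r := exploreLoop (fc st.1) A node (PySem.List.pyRange j (A.length : Int) 1) st
    foldStack A rest (r.1, r.2.1 + 1, PySem.List.pySetD r.2.2 node (r.2.1 + 1))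

def wtS (n : Nat) (stack : List (Int × Int)) : Nat :=
  (stack.map (fun fr => ((n : Int) + 1 - fr.2).toNat + 1)).sum

def wt (A : List (List Int)) (stack : List (Int × Int)) (v : List Bool) : Nat :=
  wtS A.length stack + fc v * (A.length + 2)

lemma sim (fuel : Nat) :
    ∀ (A : List (List Int)) (stack : List (Int × Int)) (v : List Bool) (c : Int) (p : List Int),
      wt A stack v < fuel → (∀ fr ∈ stack, 1 ≤ fr.2) → A.length ≤ v.length →
      dfsStep fuel A stack v c p = foldStack A stack (v, c, p) := by
  induction fuel with
  | zero => intro A stack v c p h; omega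
  | succ f ih =>
    intro A stack v c p hw hstk hL
    match stack with
    | [] => simp [dfsStep, foldStack]
    | (node, j) :: rest =>
      rw [dfsStep, foldStack]
      have hterm : 1 ≤ ((A.length : Int) + 1 - j).toNat + 1 := by omega
      by_cases hj : j < (A.length : Int)
      · rw [if_pos hj]
        have hj1 : (1 : Int) ≤ j := hstk (node, j) (by simp)
        split
        · rename_i hg
          -- push case
          have hjl : j.toNat < v.length := by omega
          have hfalse : v[j.toNat] = false := by
            rw [PySem.List.pyGetD_eq_getElem v false (by omega) (by omega)] at hg
            exact hg.2
          have hset : fc (PySem.List.pySetD v j true) + 1 = fc v := by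
            rw [PySem.List.pySetD_of_nonneg v true (by omega)]
            exact fc_set_false v j.toNat hjl hfalse
          have hwt : wt A ((j, 1) :: (node, j + 1) :: rest) (PySem.List.pySetD v j true) < f := by
            simp only [wt, wtS, List.map_cons, List.sum_cons] at hw ⊢
            have hprod : fc (PySem.List.pySetD v j true) * (A.length + 2) + (A.length + 2)
                = fc v * (A.length + 2) := by
              rw [← hset]; ring
            omega
          rw [ih A _ _ c p hwt
            (by intro fr hfr
                simp only [List.mem_cons] at hfr
                rcases hfr with rfl | rfl | h
                · simp
                · simp only []; omega
                · exact hstk fr (List.mem_cons_of_mem _ h))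
            (by rw [PySem.List.length_pySetD]; exact hL)]
          -- now both sides are foldStack applications; peel the (j,1) frame
          rw [foldStack]
          -- A-side: unfold one column step and one recursive call
          rw [PySem.List.pyRange_one_cons hj, exploreLoop]
          rw [if_pos hg]
          -- exploreGo (fc v) with fc v = (fc v - 1) + 1
          have hfc : fc v = (fc (PySem.List.pySetD v j true)) + 1 := by omega
          rw [hfc, exploreGo]
          set v' := PySem.List.pySetD v j true with hv'
          set r1 := exploreLoop (fc v') A j (PySem.List.pyRange 1 (A.length : Int) 1) (v', c, p) with hr1
          set E : List Bool × Int × List Int := (r1.1, r1.2.1 + 1, PySem.List.pySetD r1.2.2 j (r1.2.1 + 1)) with hE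
          rw [foldStack]
          -- align fuels on the resumed frame (node, j+1)
          obtain ⟨hM1, hM2⟩ := loopM (fc v') A j (PySem.List.pyRange 1 (A.length : Int) 1) (v', c, p)
          have hM1' : r1.1.length = v'.length := hM1
          have hM2' : fc r1.1 ≤ fc v' := hM2
          have hlen' : v'.length = v.length := PySem.List.length_pySetD v j true
          have hstab := sLoop (fc E.1) (fc v' + 1) A node
            (fun v'' j'' c'' p'' ha hb hc => sExp _ _ A v'' j'' c'' p'' ha hb hc)
            (PySem.List.pyRange (j + 1) (A.length : Int) 1) E
            (fun x hx => by
              have := (PySem.List.mem_pyRange_one).mp hx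
              exact ⟨by omega, this.2⟩)
            (le_refl _) (by change fc r1.1 ≤ fc v' + 1; omega)
            (by change A.length ≤ r1.1.length; omega)
          rw [hstab]
        · rename_i hg
          -- skip case
          have hwt : wt A ((node, j + 1) :: rest) v < f := by
            simp only [wt, wtS, List.map_cons, List.sum_cons] at hw ⊢
            omega
          rw [ih A _ _ c p hwt
            (by intro fr hfr
                simp only [List.mem_cons] at hfr
                rcases hfr with rfl | h
                · simp only []; omega
                · exact hstk fr (List.mem_cons_of_mem _ h)) hL]
          rw [foldStack]
          rw [PySem.List.pyRange_one_cons hj, exploreLoop, if_neg hg]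
      · rw [if_neg hj]
        have hwt : wt A rest v < f := by
          simp only [wt, wtS, List.map_cons, List.sum_cons] at hw ⊢
          omega
        rw [ih A _ _ _ _ hwt (fun fr hfr => hstk fr (by simp [hfr])) hL]
        rw [PySem.List.pyRange_one_eq_nil (by omega), exploreLoop]

-- ===== VERDICT (by name: the statement is the Claim_ definition above) =====
theorem explore_spec : Claim_equal_explore := by
  intro A v i c p hdom hpre
  obtain ⟨hrows, hv, hp, hi1, hi2⟩ := hpre
  unfold Spec_explore explore explore_alt
  set v1 := PySem.List.pySetD v i true with hv1
  have hlen1 : v1.length = v.length := PySem.List.length_pySetD v i true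
  have hfc1 : fc v1 ≤ v.length := by
    have := fc_le_length v1; omega
  -- B side: collapse the stack machine
  have hsim := sim ((v.length + 1) * (A.length + 2)) A [(i, 1)] v1 c p
    (by
      simp only [wt, wtS, List.map_cons, List.map_nil, List.sum_cons, List.sum_nil]
      have h2 : fc v1 * (A.length + 2) ≤ v.length * (A.length + 2) :=
        Nat.mul_le_mul_right _ hfc1
      have h3 : (v.length + 1) * (A.length + 2) = v.length * (A.length + 2) + (A.length + 2) := by ring
      omega)
    (by intro fr hfr; simp only [List.mem_cons, List.not_mem_nil, or_false] at hfr
        simp [hfr])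
    (by omega)
  rw [hsim, foldStack, foldStack]
  -- A side: unfold the top call
  rw [show v.length + 1 = Nat.succ v.length from rfl, exploreGo]
  -- align fuels on the top-level column loop
  have hstab := sLoop v.length (fc v1) A i
    (fun v'' j'' c'' p'' ha hb hc => sExp _ _ A v'' j'' c'' p'' ha hb hc)
    (PySem.List.pyRange 1 (A.length : Int) 1) (v1, c, p)
    (fun x hx => by
      have := (PySem.List.mem_pyRange_one).mp hx
      exact ⟨by omega, this.2⟩)
    hfc1 (le_refl _) (by change A.length ≤ v1.length; omega)
  rw [hstab]
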